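-- pv_equiv track=rewrite | github.com/jjteunisse/aoc-2023 | joris/day_12.py | get_valid_positions
-- ===== SOURCE A (Python) =====
-- def get_valid_positions(string: str, group_size: int) -> list[int]:
-- 	# Returns all (starting) positions where the group fits into the string.
--
-- 	# Pad the string first, to deal with edge cases efficiently.
-- 	string = '.' + string + '.'
--
-- 	# Use a sliding window to check whether the string fits.
-- 	n_possible_splits = len(string) - group_size - 1
-- 	valid_splits = []
-- 	for i in range(n_possible_splits):
-- 		window = string[i : i + group_size + 2]
-- 		if (
-- 			window[0] != '#' and
-- 			window[group_size + 1] != '#' and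
-- 			'.' not in window[1 : group_size + 1]
-- 		):
-- 			valid_splits.append(i)
--
-- 	return valid_splits
-- ===== SOURCE B (Python) =====
-- def get_valid_positions(string: str, group_size: int) -> list[int]:
-- 	# Prefix-sum of '.' counts: each window's "no '.' inside" test is O(1),
-- 	# so the whole scan is O(n) instead of O(n * group_size).
-- 	s = '.' + string + '.'
-- 	dots = [0]
-- 	for c in s:
-- 		dots.append(dots[-1] + (c == '.'))
-- 	valid_splits = []
-- 	for i in range(len(s) - group_size - 1):
-- 		if (
-- 			s[i] != '#' and
-- 			s[i + group_size + 1] != '#' and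
-- 			dots[i + group_size + 1] == dots[i + 1]
-- 		):
-- 			valid_splits.append(i)
-- 	return valid_splits
-- ===== Notes on version B (the rewrite author's own statement) =====
-- stated objective: faster
-- what changed: Replaces the per-position window slice and '.' substring scan with a prefix-sum array of '.' counts, so each position is tested in O(1) instead of O(group_size).
-- outside the precondition, e.g. on get_valid_positions('', -1): A returns [0, 1], B returns []
import Mathlib
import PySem

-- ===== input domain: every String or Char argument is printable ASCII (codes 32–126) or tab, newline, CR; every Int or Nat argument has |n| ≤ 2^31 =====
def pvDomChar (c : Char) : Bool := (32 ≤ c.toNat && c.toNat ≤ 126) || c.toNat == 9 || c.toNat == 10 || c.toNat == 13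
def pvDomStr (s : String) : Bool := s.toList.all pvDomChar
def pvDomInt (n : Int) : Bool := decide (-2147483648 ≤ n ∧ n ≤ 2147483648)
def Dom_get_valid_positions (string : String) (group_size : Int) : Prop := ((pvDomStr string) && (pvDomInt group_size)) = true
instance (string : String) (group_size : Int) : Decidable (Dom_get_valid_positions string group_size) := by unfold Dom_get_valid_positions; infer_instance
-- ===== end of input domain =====

-- B replaces A's per-window slice-and-scan with a prefix-sum array of '.' counts (O(n) instead of O(n*group_size)).


-- ===== PORT A =====
def get_valid_positions (string : String) (group_size : Int) : List Int :=
  let s : List Char := '.' :: string.toList ++ ['.']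
  let n_possible_splits : Int := (s.length : Int) - group_size - 1
  (PySem.List.pyRange 0 n_possible_splits 1).foldl (fun acc i =>
    let window := PySem.List.slice s (some i) (some (i + group_size + 2))
    if PySem.List.pyGetD window 0 ' ' ≠ '#' ∧
       PySem.List.pyGetD window (group_size + 1) ' ' ≠ '#' ∧
       ¬ ('.' ∈ PySem.List.slice window (some 1) (some (group_size + 1)))
    then acc ++ [i] else acc) []

-- ===== PORT B =====
def get_valid_positions_alt (string : String) (group_size : Int) : List Int :=
  let s : List Char := '.' :: string.toList ++ ['.']
  let dots : List Int :=
    s.foldl (fun acc c => acc ++ [PySem.List.pyGetD acc (-1) 0 + (if c = '.' then 1 else 0)]) [0]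
  (PySem.List.pyRange 0 ((s.length : Int) - group_size - 1) 1).foldl (fun acc i =>
    if PySem.List.pyGetD s i ' ' ≠ '#' ∧
       PySem.List.pyGetD s (i + group_size + 1) ' ' ≠ '#' ∧
       PySem.List.pyGetD dots (i + group_size + 1) 0 = PySem.List.pyGetD dots (i + 1) 0
    then acc ++ [i] else acc) []

-- ===== PRECONDITION & SPEC =====
-- Pre_ excludes negative group sizes: a '#'-group length is naturally ≥ 0; there A raises
-- IndexError (group_size ≤ -2 on a nonempty padded window range) or, for group_size = -1,
-- returns a value that is an unspecifiable accident of the empty-window corner which B's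
-- prefix-sum reading resolves differently (both values are defensible, nobody would specify either).
def Pre_get_valid_positions (string : String) (group_size : Int) : Prop := 0 ≤ group_size
instance (string : String) (group_size : Int) : Decidable (Pre_get_valid_positions string group_size) := by unfold Pre_get_valid_positions; infer_instance
def pvWitness_get_valid_positions : String × Int := ("?.##?", 2)

def Spec_get_valid_positions (string : String) (group_size : Int) (out : List Int) : Prop := out = get_valid_positions_alt string group_size
instance (string : String) (group_size : Int) (out : List Int) : Decidable (Spec_get_valid_positions string group_size out) := by unfold Spec_get_valid_positions; infer_instance

-- ===== CLAIM (what is proved, stated in full; the proofs are below) =====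
def Claim_equal_get_valid_positions : Prop := ∀ (string : String) (group_size : Int), Dom_get_valid_positions string group_size → Pre_get_valid_positions string group_size → Spec_get_valid_positions string group_size (get_valid_positions string group_size)

-- ===== LEMMAS AND PROOFS =====
def pvCounts : List Char → Int → List Int
  | [], _ => []
  | c :: t, a => (a + (if c = '.' then 1 else 0)) :: pvCounts t (a + (if c = '.' then 1 else 0))

lemma pv_foldl_dots (s : List Char) (p : List Int) (a : Int) :
    s.foldl (fun acc c => acc ++ [PySem.List.pyGetD acc (-1) 0 + (if c = '.' then (1:Int) else 0)]) (p ++ [a])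
      = (p ++ [a]) ++ pvCounts s a := by
  induction s generalizing p a with
  | nil => simp [pvCounts]
  | cons c t ih =>
      simp only [List.foldl_cons, pvCounts]
      rw [PySem.List.pyGetD_neg_one_append_singleton]
      have h := ih (p ++ [a]) (a + (if c = '.' then (1:Int) else 0))
      simpa [List.append_assoc] using h

lemma pv_counts_getD (s : List Char) (a : Int) (k : Nat) (hk : k ≤ s.length) :
    (a :: pvCounts s a).getD k 0 = a + (((s.take k).count '.' : Nat) : Int) := by
  induction s generalizing a k with
  | nil =>
      have : k = 0 := by simpa using hk
      simp [this]
  | cons c t ih =>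
      cases k with
      | zero => simp
      | succ k' =>
          have hk' : k' ≤ t.length := by simpa using hk
          have h := ih (a + (if c = '.' then (1:Int) else 0)) k' hk'
          simp only [pvCounts, List.getD_cons_succ, List.take_succ_cons, List.count_cons] at *
          rw [h]
          by_cases hc : c = '.' <;> simp [hc, add_comm, add_left_comm]

lemma pv_main (string : String) (group_size : Int) (hpre : 0 ≤ group_size) :
    get_valid_positions string group_size = get_valid_positions_alt string group_size := by
  unfold get_valid_positions get_valid_positions_alt
  simp only []
  apply PySem.List.foldl_congr_mem
  intro acc i hi
  rw [PySem.List.mem_pyRange_one] at hi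
  obtain ⟨it, rfl⟩ : ∃ n : Nat, i = (n : Int) := ⟨i.toNat, (Int.toNat_of_nonneg hi.1).symm⟩
  obtain ⟨g, rfl⟩ : ∃ n : Nat, group_size = (n : Int) := ⟨group_size.toNat, (Int.toNat_of_nonneg hpre).symm⟩
  set s : List Char := '.' :: string.toList ++ ['.'] with hs
  have hlen : it + g + 2 ≤ s.length := by
    have := hi.2
    omega
  have hwin : PySem.List.slice s (some (it : Int)) (some ((it : Int) + g + 2))
      = (s.drop it).take (g + 2) := by
    rw [PySem.List.slice_toNat _ (by positivity) (by positivity)]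
    rw [show ((it : Int) + g + 2).toNat = it + g + 2 by omega,
        show ((it : Int)).toNat = it by omega,
        show it + g + 2 - it = g + 2 by omega]
  have hmid : PySem.List.slice ((s.drop it).take (g + 2)) (some 1) (some ((g : Int) + 1))
      = (s.drop (it + 1)).take g := by
    rw [PySem.List.slice_toNat _ (by norm_num) (by positivity)]
    rw [show ((1 : Int)).toNat = 1 by omega, show ((g : Int) + 1).toNat = g + 1 by omega,
        show g + 1 - 1 = g by omega]
    rw [List.drop_take, List.drop_drop, List.take_take]
    norm_num
  have E0 : PySem.List.pyGetD ((s.drop it).take (g + 2)) 0 ' ' = PySem.List.pyGetD s (it : Int) ' ' := by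
    rw [PySem.List.pyGetD_zero, PySem.List.pyGetD_natCast]
    simp [List.getD_eq_getElem?_getD, List.getElem?_drop]
  have E1 : PySem.List.pyGetD ((s.drop it).take (g + 2)) ((g : Int) + 1) ' '
      = PySem.List.pyGetD s ((it : Int) + g + 1) ' ' := by
    rw [show ((g : Int) + 1) = ((g + 1 : Nat) : Int) by push_cast; ring,
        show ((it : Int) + g + 1) = ((it + g + 1 : Nat) : Int) by push_cast; ring,
        PySem.List.pyGetD_natCast, PySem.List.pyGetD_natCast]
    simp [List.getD_eq_getElem?_getD, List.getElem?_drop]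
    rw [← Nat.add_assoc]
  have hdots : List.foldl (fun acc c => acc ++ [PySem.List.pyGetD acc (-1) 0 + if c = '.' then (1:Int) else 0]) [0] s
      = 0 :: pvCounts s 0 := by
    simpa using pv_foldl_dots s [] 0
  have D1 : PySem.List.pyGetD (0 :: pvCounts s 0) ((it : Int) + g + 1) 0
      = (((s.take (it + g + 1)).count '.' : Nat) : Int) := by
    rw [show ((it : Int) + g + 1) = ((it + g + 1 : Nat) : Int) by push_cast; ring,
        PySem.List.pyGetD_natCast, pv_counts_getD s 0 _ (by omega)]
    ring
  have D2 : PySem.List.pyGetD (0 :: pvCounts s 0) ((it : Int) + 1) 0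
      = (((s.take (it + 1)).count '.' : Nat) : Int) := by
    rw [show ((it : Int) + 1) = ((it + 1 : Nat) : Int) by push_cast; ring,
        PySem.List.pyGetD_natCast, pv_counts_getD s 0 _ (by omega)]
    ring
  have hsplit : s.take (it + g + 1) = s.take (it + 1) ++ (s.drop (it + 1)).take g := by
    rw [← List.take_add]
    congr 1
    omega
  rw [hwin, hmid, hdots, E0, E1, D1, D2, hsplit]
  apply if_congr _ rfl rfl
  simp only [List.count_append, Nat.cast_add, and_congr_right_iff]
  intro _ _
  rw [← List.count_eq_zero (a := '.')]
  omega

-- ===== VERDICT (by name: the statement is the Claim_ definition above) =====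
theorem get_valid_positions_spec : Claim_equal_get_valid_positions := by
  intro string group_size _ hpre
  exact pv_main string group_size hpre
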